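-- pv_equiv track=rewrite | github.com/root-project/root | documentation/doxygen/converttonotebook.py | cppComments
-- ===== SOURCE A (Python) =====
-- def convertDoxygenLatexToMarkdown(text):
--     """Replace formula tags used by doxygen to the ones used in notebooks."""
--     text = text.replace("\\f$", "$")
--     text = text.replace("\\f[", "$$")
--     text = text.replace("\\f]", "$$")
--     return text
--
-- def cppComments(text):
--     """
--     Converts comments delimited by // and on a new line into a markdown cell. Skips comments inside
--     blocks and braces, though, since these would otherwise be ripped apart. For C++ files only.
--     >>> cppComments('''// This is a
--     ... // multiline comment
--     ... void function(){}''')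
--     '# <markdowncell>\\n# This is a\\n#  multiline comment\\n# <codecell>\\nvoid function(){}\\n'
--     >>> cppComments('''void function(){
--     ...    int variable = 5 // Comment not in cell
--     ...    // Comment also not in cell
--     ... }''')
--     'void function(){\\n   int variable = 5 // Comment not in cell\\n   // Comment also not in cell\\n}\\n'
--     """
--     newtext = ''
--     inComment = False
--     curlyDepth = 0
--     braceDepth = 0
--
--     for line in text.splitlines():
--
--         if line.strip().startswith("//") and curlyDepth == 0 and braceDepth == 0:
--             line = line.strip(" /")
--
--             # Allow for doxygen-style latex:
--             line = convertDoxygenLatexToMarkdown(line)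
--
--             if not inComment:  # True if first line of comment
--                 inComment = True
--                 newtext += "# <markdowncell>\n\n"
--             newtext += ("# " + line + "\n")
--         else:
--             for char in line:
--                 if char == "(":
--                     braceDepth += 1
--                 elif char == ")":
--                     braceDepth -= 1
--                 elif char == "{":
--                     curlyDepth += 1
--                 elif char == "}":
--                     curlyDepth -= 1
--
--             if inComment:  # True if first line after comment
--                 inComment = False
--                 newtext += "# <codecell>\n"
--
--             newtext += (line+"\n")
--
--     return newtext
-- ===== SOURCE B (Python) =====
-- def _latex(t):
--     return t.replace("\\f$", "$").replace("\\f[", "$$").replace("\\f]", "$$")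
--
--
-- def cppComments(text):
--     # pass 1: classify each line, tracking nesting depth on code lines
--     records = []
--     curly = 0
--     brace = 0
--     for line in text.splitlines():
--         if line.strip().startswith("//") and curly == 0 and brace == 0:
--             records.append((True, _latex(line.strip(" /"))))
--         else:
--             for ch in line:
--                 if ch == "(":
--                     brace += 1
--                 elif ch == ")":
--                     brace -= 1
--                 elif ch == "{":
--                     curly += 1
--                 elif ch == "}":
--                     curly -= 1
--             records.append((False, line))
--     # pass 2: render the records as notebook cells
--     chunks = []
--     inComment = False
--     for is_md, line in records:
--         if is_md:
--             if not inComment: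
--                 chunks.append("# <markdowncell>\n\n")
--             inComment = True
--             chunks.append("# " + line + "\n")
--         else:
--             if inComment:
--                 chunks.append("# <codecell>\n")
--             inComment = False
--             chunks.append(line + "\n")
--     return "".join(chunks)
-- ===== Notes on version B (the rewrite author's own statement) =====
-- stated objective: alternative
-- what changed: B splits A's single fused loop into two passes: pass 1 parses the lines into (is_markdown, content) records while tracking brace/curly depth, pass 2 renders the records into cells with an inComment flag, collecting chunks joined at the end instead of repeated string concatenation.
import Mathlib
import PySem

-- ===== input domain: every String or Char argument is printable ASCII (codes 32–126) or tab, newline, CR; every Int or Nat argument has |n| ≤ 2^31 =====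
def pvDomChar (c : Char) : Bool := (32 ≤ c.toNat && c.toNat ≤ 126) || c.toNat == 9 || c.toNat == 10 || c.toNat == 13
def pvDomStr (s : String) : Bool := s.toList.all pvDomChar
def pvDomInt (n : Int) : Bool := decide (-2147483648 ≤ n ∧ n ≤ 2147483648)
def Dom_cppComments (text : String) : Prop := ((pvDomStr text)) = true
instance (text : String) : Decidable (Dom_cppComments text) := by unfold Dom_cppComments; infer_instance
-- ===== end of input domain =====

-- B replaces A's fused loop by a parse pass (line records + depths) and a render pass; same output, alternative decomposition.

-- ===== PORT A =====
-- convertDoxygenLatexToMarkdown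
def pvLatexA (cs : List Char) : List Char :=
  PySem.Chars.replace
    (PySem.Chars.replace
      (PySem.Chars.replace cs "\\f$".toList "$".toList)
      "\\f[".toList "$$".toList)
    "\\f]".toList "$$".toList

-- the body of A's inner 'for char in line' loop; state = (braceDepth, curlyDepth)
def pvDepthStepA (s : Int × Int) (c : Char) : Int × Int :=
  if c = '(' then (s.1 + 1, s.2)
  else if c = ')' then (s.1 - 1, s.2)
  else if c = '{' then (s.1, s.2 + 1)
  else if c = '}' then (s.1, s.2 - 1)
  else s

-- A's loop state: (newtext, inComment, curlyDepth, braceDepth)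
def pvStepA (st : List Char × Bool × Int × Int) (line : List Char) :
    List Char × Bool × Int × Int :=
  if PySem.Chars.startswith (PySem.Chars.strip line) "//".toList
      && st.2.2.1 == 0 && st.2.2.2 == 0 then
    let l := pvLatexA (PySem.Chars.stripChars line " /".toList)
    let nt := if st.2.1 then st.1 else st.1 ++ "# <markdowncell>\n\n".toList
    (nt ++ "# ".toList ++ l ++ "\n".toList, true, st.2.2.1, st.2.2.2)
  else
    let d := line.foldl pvDepthStepA (st.2.2.2, st.2.2.1)
    let nt := if st.2.1 then st.1 ++ "# <codecell>\n".toList else st.1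
    (nt ++ line ++ "\n".toList, false, d.2, d.1)

def cppComments (text : String) : String :=
  String.ofList ((PySem.Chars.splitlines text.toList).foldl pvStepA ([], false, 0, 0)).1

-- ===== PORT B =====
def pvLatexB (cs : List Char) : List Char :=
  PySem.Chars.replace
    (PySem.Chars.replace
      (PySem.Chars.replace cs "\\f$".toList "$".toList)
      "\\f[".toList "$$".toList)
    "\\f]".toList "$$".toList

-- B's per-char depth update; state = (brace, curly)
def pvDepthStepB (s : Int × Int) (c : Char) : Int × Int :=
  if c = '(' then (s.1 + 1, s.2)
  else if c = ')' then (s.1 - 1, s.2)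
  else if c = '{' then (s.1, s.2 + 1)
  else if c = '}' then (s.1, s.2 - 1)
  else s

-- pass 1: build the records, threading (curly, brace)
def pvParse : List (List Char) → Int → Int → List (Bool × List Char)
  | [], _, _ => []
  | l :: ls, cd, bd =>
    if PySem.Chars.startswith (PySem.Chars.strip l) "//".toList
        && cd == 0 && bd == 0 then
      (true, pvLatexB (PySem.Chars.stripChars l " /".toList)) :: pvParse ls cd bd
    else
      let d := l.foldl pvDepthStepB (bd, cd)
      (false, l) :: pvParse ls d.2 d.1

-- pass 2: render the records into chunks, threading inComment
def pvRender : List (Bool × List Char) → Bool → List (List Char)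
  | [], _ => []
  | (md, l) :: rs, inC =>
    if md then
      (if inC then [] else ["# <markdowncell>\n\n".toList]) ++
        ("# ".toList ++ l ++ "\n".toList) :: pvRender rs true
    else
      (if inC then ["# <codecell>\n".toList] else []) ++
        (l ++ "\n".toList) :: pvRender rs false

def cppComments_alt (text : String) : String :=
  String.ofList (PySem.Chars.join []
    (pvRender (pvParse (PySem.Chars.splitlines text.toList) 0 0) false))

-- ===== PRECONDITION & SPEC =====
def Spec_cppComments (text : String) (out : String) : Prop := out = cppComments_alt text
instance (text : String) (out : String) : Decidable (Spec_cppComments text out) := by unfold Spec_cppComments; infer_instance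

-- ===== CLAIM (what is proved, stated in full; the proofs are below) =====
def Claim_equal_cppComments : Prop := ∀ (text : String), Dom_cppComments text → Spec_cppComments text (cppComments text)

-- ===== LEMMAS AND PROOFS =====

-- "".join(chunks) is flatten
theorem pvJoinNil (l : List (List Char)) : PySem.Chars.join [] l = l.flatten := by
  induction l with
  | nil => simp [PySem.Chars.join_nil]
  | cons a rest ih =>
    cases rest with
    | nil => simp [PySem.Chars.join_singleton]
    | cons b r => simp [PySem.Chars.join_cons_cons, ih]

theorem pvKey (ls : List (List Char)) : ∀ (acc : List Char) (inC : Bool) (cd bd : Int),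
    (ls.foldl pvStepA (acc, inC, cd, bd)).1 =
      acc ++ (pvRender (pvParse ls cd bd) inC).flatten := by
  induction ls with
  | nil => intro acc inC cd bd; simp [pvParse, pvRender]
  | cons l ls ih =>
    intro acc inC cd bd
    by_cases h : (PySem.Chars.startswith (PySem.Chars.strip l) "//".toList
        && cd == 0 && bd == 0) = true
    · simp only [List.foldl_cons, pvStepA, pvParse]
      rw [if_pos h, if_pos h, ih]
      cases inC <;>
        simp [pvRender, pvLatexA, pvLatexB, List.append_assoc]
    · simp only [List.foldl_cons, pvStepA, pvParse]
      rw [if_neg h, if_neg h,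
        show pvDepthStepB = pvDepthStepA from rfl, ih]
      cases inC <;>
        simp [pvRender, List.append_assoc]

-- ===== VERDICT (by name: the statement is the Claim_ definition above) =====
theorem cppComments_spec : Claim_equal_cppComments := by
  intro text _
  unfold Spec_cppComments cppComments cppComments_alt
  rw [pvJoinNil, pvKey]
  simp
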